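-- pv_equiv track=rewrite | github.com/gypsyx/py_ds_algos | tmp/all_substrings.py | find_substrings_with_pattern
-- ===== SOURCE A (Python) =====
-- def find_substrings_with_pattern(input_string, pattern):
--     substrings = []
--     pattern_length = len(pattern)
--     input_length = len(input_string)
--
--     for i in range(input_length):
--         for j in range(i + 1, input_length + 1):
--             substring = input_string[i:j]
--             if pattern in substring:
--                 substrings.append(substring)
--
--     return substrings
-- ===== SOURCE B (Python) =====
-- def find_substrings_with_pattern(input_string, pattern):
--     n = len(input_string)
--     m = len(pattern)
--     result = []
--     for i in range(n):
--         p = input_string.find(pattern, i)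
--         if p == -1:
--             break
--         start = p + m if p + m > i else i + 1
--         for j in range(start, n + 1):
--             result.append(input_string[i:j])
--     return result
-- ===== Notes on version B (the rewrite author's own statement) =====
-- stated objective: faster
-- what changed: Instead of testing every substring s[i:j] for the pattern (a containment scan per pair), B calls find(pattern, i) once per start index, emits the substrings from j = max(i+1, p+m) unconditionally, and breaks the outer loop as soon as no occurrence remains.
import Mathlib
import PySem

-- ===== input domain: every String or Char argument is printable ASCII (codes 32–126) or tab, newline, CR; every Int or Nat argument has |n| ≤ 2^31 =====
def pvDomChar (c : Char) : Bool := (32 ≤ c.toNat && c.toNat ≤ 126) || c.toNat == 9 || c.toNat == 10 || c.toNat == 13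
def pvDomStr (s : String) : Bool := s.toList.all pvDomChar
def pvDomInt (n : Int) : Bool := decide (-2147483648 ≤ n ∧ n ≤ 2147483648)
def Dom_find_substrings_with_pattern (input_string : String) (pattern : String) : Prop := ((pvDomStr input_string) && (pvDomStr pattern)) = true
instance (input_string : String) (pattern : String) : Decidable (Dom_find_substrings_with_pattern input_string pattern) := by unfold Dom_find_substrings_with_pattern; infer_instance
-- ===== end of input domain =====

-- B replaces A's "test every substring for the pattern" (O(n^3·m)) by one find() per start index:
-- from start i, s[i:j] contains the pattern iff j reaches past the first occurrence at or after i,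
-- so B emits that tail of substrings directly and breaks as soon as no occurrence remains.


-- ===== PORT A =====
-- inner loop 'for j in range(i+1, input_length+1): …'
def pvInnerA (s pat : String) (n i : Int) (acc : List String) : List String :=
  (PySem.List.pyRange (i + 1) (n + 1) 1).foldl (fun acc j =>
    let substring := PySem.Str.slice s (some i) (some j)
    if PySem.Str.isIn pat substring then acc ++ [substring] else acc) acc

def find_substrings_with_pattern (input_string : String) (pattern : String) : List String :=
  let _pattern_length := PySem.Str.len pattern   -- computed by A, never used
  let input_length := PySem.Str.len input_string
  (PySem.List.pyRange 0 input_length 1).foldl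
    (fun substrings i => pvInnerA input_string pattern input_length i substrings) []

-- ===== PORT B =====
-- inner loop 'for j in range(start, n+1): result.append(input_string[i:j])'
def pvEmitAll (s : String) (n i start : Int) (acc : List String) : List String :=
  (PySem.List.pyRange start (n + 1) 1).foldl
    (fun acc j => acc ++ [PySem.Str.slice s (some i) (some j)]) acc

-- 'for i in range(n): … break …' as fuel recursion, fuel = number of remaining iterations
def pvAltLoop (s pat : String) (n m : Int) : Nat → Int → List String → List String
  | 0, _, result => result
  | fuel + 1, i, result =>
    let p := PySem.Str.findFrom s pat i none
    if p = -1 then result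
    else
      let start := if p + m > i then p + m else i + 1
      pvAltLoop s pat n m fuel (i + 1) (pvEmitAll s n i start result)

def find_substrings_with_pattern_alt (input_string : String) (pattern : String) : List String :=
  let n := PySem.Str.len input_string
  let m := PySem.Str.len pattern
  pvAltLoop input_string pattern n m n.toNat 0 []

-- ===== PRECONDITION & SPEC =====
def Spec_find_substrings_with_pattern (input_string : String) (pattern : String) (out : List String) : Prop := out = find_substrings_with_pattern_alt input_string pattern
instance (input_string : String) (pattern : String) (out : List String) : Decidable (Spec_find_substrings_with_pattern input_string pattern out) := by unfold Spec_find_substrings_with_pattern; infer_instance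

-- ===== CLAIM (what is proved, stated in full; the proofs are below) =====
def Claim_equal_find_substrings_with_pattern : Prop := ∀ (input_string : String) (pattern : String), Dom_find_substrings_with_pattern input_string pattern → Spec_find_substrings_with_pattern input_string pattern (find_substrings_with_pattern input_string pattern)

-- ===== LEMMAS AND PROOFS =====

-- 'pattern in s[i:j]' ↔ some occurrence of the pattern starts at q ∈ [i, j - m]
lemma pvIsIn_slice_iff (s pat : String) (i j : Nat) (hij : i ≤ j) :
    PySem.Str.isIn pat (PySem.Str.slice s (some (i : Int)) (some (j : Int))) = true ↔
    ∃ q : Nat, i ≤ q ∧ q + pat.toList.length ≤ j ∧ pat.toList <+: s.toList.drop q := by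
  rw [PySem.Str.isIn_eq, PySem.Str.toList_slice, PySem.Chars.slice_eq_listSlice,
      PySem.List.slice_natCast, ← PySem.Chars.exists_prefix_drop_iff_isIn]
  constructor
  · rintro ⟨k, hk⟩
    rw [List.drop_take, List.drop_drop] at hk
    rcases List.prefix_take_iff.mp hk with ⟨hpre, hlen⟩
    by_cases hm : pat.toList.length = 0
    · exact ⟨i, le_refl _, by omega, by simp [List.length_eq_zero_iff.mp hm]⟩
    · exact ⟨i + k, by omega, by omega, hpre⟩
  · rintro ⟨q, hiq, hqm, hpre⟩
    refine ⟨q - i, ?_⟩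
    rw [List.drop_take, List.drop_drop]
    rw [List.prefix_take_iff]
    have hq : i + (q - i) = q := by omega
    rw [hq]
    exact ⟨hpre, by omega⟩

-- an occurrence at q ≥ i is an infix of the tail from i
lemma pvPrefix_drop_infix (pat l : List Char) (i q : Nat) (hiq : i ≤ q)
    (hpre : pat <+: l.drop q) : pat <:+: l.drop i := by
  refine List.infix_iff_prefix_suffix.mpr ⟨l.drop q, hpre, ?_⟩
  have : l.drop q = (l.drop i).drop (q - i) := by
    rw [List.drop_drop]; congr 1; omega
  rw [this]; exact List.drop_suffix _ _

-- with no occurrence at or after i, the pattern is in no substring starting at i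
lemma pvInnerA_no_occ (s pat : String) (n : Int) (i : Nat) (acc : List String)
    (hno : ¬ pat.toList <:+: s.toList.drop i) :
    pvInnerA s pat n (i : Int) acc = acc := by
  unfold pvInnerA
  rw [PySem.List.foldl_congr_mem _ _ (fun acc _ => acc) acc ?_]
  · exact List.foldl_fixed _
  · intro a j hj
    rcases (PySem.List.mem_pyRange_one).mp hj with ⟨h1, h2⟩
    have h0 : 0 ≤ j := by omega
    have hj' : j = ((j.toNat : Nat) : Int) := by omega
    rw [hj']
    simp only []
    have : PySem.Str.isIn pat (PySem.Str.slice s (some (i : Int)) (some ((j.toNat : Nat) : Int))) = false := by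
      rw [Bool.eq_false_iff]
      intro htrue
      rcases (pvIsIn_slice_iff s pat i j.toNat (by omega)).mp htrue with ⟨q, hiq, _, hpre⟩
      exact hno (pvPrefix_drop_infix _ _ i q hiq hpre)
    rw [this]
    simp

-- with first occurrence p ≥ i, A's inner loop keeps exactly the substrings with j ≥ max(i+1, p+m)
lemma pvInnerA_occ (s pat : String) (n : Int) (i p : Nat) (acc : List String)
    (hn : n = (s.toList.length : Int)) (hin : i ≤ s.toList.length)
    (hip : i ≤ p) (hpre : pat.toList <+: s.toList.drop p)
    (hmin : ∀ q : Nat, i ≤ q → q < p → ¬ pat.toList <+: s.toList.drop q)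
    (hpn : p ≤ s.toList.length) :
    pvInnerA s pat n (i : Int) acc =
      pvEmitAll s n (i : Int)
        (if (p : Int) + (pat.toList.length : Int) > (i : Int) then (p : Int) + (pat.toList.length : Int) else (i : Int) + 1) acc := by
  set m := pat.toList.length with hm
  have hmn : p + m ≤ s.toList.length := by
    have := hpre.length_le
    rw [List.length_drop] at this
    omega
  set startI : Int := if (p : Int) + (m : Int) > (i : Int) then (p : Int) + (m : Int) else (i : Int) + 1 with hstart
  have hsmax : startI = max ((i : Int) + 1) ((p : Int) + (m : Int)) := by
    rw [hstart]; split_ifs with h <;> omega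
  have h1 : (i : Int) + 1 ≤ startI := by omega
  have h2 : startI ≤ n + 1 := by omega
  unfold pvInnerA pvEmitAll
  rw [PySem.List.foldl_congr_mem _ _
      (fun acc j => if decide (startI ≤ j) then acc ++ [PySem.Str.slice s (some (i : Int)) (some j)] else acc) acc ?_]
  · rw [PySem.List.pyRange_one_append (i + 1) startI (n + 1) h1 h2, List.foldl_append]
    rw [PySem.List.foldl_congr_mem _ _ (fun acc _ => acc) acc ?_]
    · rw [List.foldl_fixed]
      rw [PySem.List.foldl_congr_mem _ _
          (fun acc j => acc ++ [PySem.Str.slice s (some (i : Int)) (some j)]) acc ?_]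
      intro a j hj
      rcases (PySem.List.mem_pyRange_one).mp hj with ⟨hj1, _⟩
      simp [hj1]
    · intro a j hj
      rcases (PySem.List.mem_pyRange_one).mp hj with ⟨_, hj2⟩
      have : ¬ (startI ≤ j) := by omega
      simp [this]
  · intro a j hj
    rcases (PySem.List.mem_pyRange_one).mp hj with ⟨hj1, hj2⟩
    have hj' : j = ((j.toNat : Nat) : Int) := by omega
    simp only []
    have hcond : PySem.Str.isIn pat (PySem.Str.slice s (some (i : Int)) (some j)) = decide (startI ≤ j) := by
      rw [hj']
    -- prove boolean equality via iff
      by_cases hle : startI ≤ ((j.toNat : Nat) : Int)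
      · rw [decide_eq_true_eq.mpr hle]
        exact (pvIsIn_slice_iff s pat i j.toNat (by omega)).mpr ⟨p, hip, by omega, hpre⟩
      · have : decide (startI ≤ ((j.toNat : Nat) : Int)) = false := decide_eq_false hle
        rw [this, Bool.eq_false_iff]
        intro htrue
        rcases (pvIsIn_slice_iff s pat i j.toNat (by omega)).mp htrue with ⟨q, hiq, hqm, hq⟩
        have hqp : p ≤ q := by
          by_contra hlt
          exact hmin q hiq (by omega) hq
        omega
    rw [hcond]

-- an occurrence after i+1 is also one after i
lemma pvInfix_drop_succ (pat l : List Char) (i : Nat)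
    (h : pat <:+: l.drop (i + 1)) : pat <:+: l.drop i := by
  have hs : l.drop (i + 1) <:+ l.drop i := by
    have h := List.drop_suffix 1 (l.drop i)
    rw [List.drop_drop] at h
    simpa [Nat.add_comm] using h
  exact h.trans hs.isInfix

-- once no occurrence remains, the rest of A's outer loop adds nothing (B's break)
lemma pvOuterA_no_occ (s pat : String) (n : Int) (hn : n = (s.toList.length : Int)) :
    ∀ (k : Nat) (i : Nat) (acc : List String), (i : Int) + k = n →
    ¬ pat.toList <:+: s.toList.drop i →
    (PySem.List.pyRange (i : Int) n 1).foldl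
      (fun substrings i' => pvInnerA s pat n i' substrings) acc = acc := by
  intro k
  induction k with
  | zero =>
    intro i acc hik _
    rw [PySem.List.pyRange_one_eq_nil (by omega)]
    rfl
  | succ k ih =>
    intro i acc hik hno
    rw [PySem.List.pyRange_one_cons (by omega), List.foldl_cons]
    rw [pvInnerA_no_occ s pat n i acc hno]
    have : ((i : Int) + 1) = (((i + 1 : Nat) : Nat) : Int) := by omega
    rw [this]
    exact ih (i + 1) acc (by omega) (fun h => hno (pvInfix_drop_succ _ _ i h))

-- main loop correspondence, fuel = remaining iterations of B's loop
lemma pvMain (s pat : String) (n m : Int) (hn : n = (s.toList.length : Int))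
    (hm : m = (pat.toList.length : Int)) :
    ∀ (fuel : Nat) (i : Nat) (acc : List String), (i : Int) + fuel = n →
    (PySem.List.pyRange (i : Int) n 1).foldl
      (fun substrings i' => pvInnerA s pat n i' substrings) acc =
    pvAltLoop s pat n m fuel (i : Int) acc := by
  intro fuel
  induction fuel with
  | zero =>
    intro i acc hik
    rw [PySem.List.pyRange_one_eq_nil (by omega)]
    rfl
  | succ fuel ih =>
    intro i acc hik
    have hin : i ≤ s.toList.length := by omega
    simp only [pvAltLoop, PySem.Str.findFrom_eq]
    by_cases hp : PySem.Chars.findFrom s.toList pat.toList (i : Int) none = -1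
    · rw [if_pos hp]
      exact pvOuterA_no_occ s pat n hn (fuel + 1) i acc hik
        ((PySem.Chars.findFrom_natCast_eq_neg_one_iff s.toList pat.toList i hin).mp hp)
    · rw [if_neg hp]
      rcases PySem.Chars.findFrom_natCast_spec s.toList pat.toList i hin hp with ⟨hge, hpre, hmin⟩
      set P : Nat := (PySem.Chars.findFrom s.toList pat.toList (i : Int) none).toNat with hP
      have h0 : 0 ≤ PySem.Chars.findFrom s.toList pat.toList (i : Int) none := by omega
      have hPI : PySem.Chars.findFrom s.toList pat.toList (i : Int) none = (P : Int) := by omega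
      have hPn : P ≤ s.toList.length := by
        rw [PySem.Chars.findFrom_natCast s.toList pat.toList i hin] at hPI
        by_cases hf : PySem.Chars.find (s.toList.drop i) pat.toList = -1
        · rw [if_pos hf] at hPI; omega
        · rw [if_neg hf] at hPI
          have := PySem.Chars.find_le_length (s.toList.drop i) pat.toList
          rw [List.length_drop] at this
          omega
      have hip : i ≤ P := by omega
      rw [PySem.List.pyRange_one_cons (by omega), List.foldl_cons]
      rw [pvInnerA_occ s pat n i P acc hn hin hip hpre (fun q h1 h2 => hmin q h1 h2) hPn]
      rw [hPI, ← hm]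
      have hcast : ((i : Int) + 1) = (((i + 1 : Nat) : Nat) : Int) := by omega
      rw [hcast]
      exact ih (i + 1) _ (by omega)

-- ===== VERDICT (by name: the statement is the Claim_ definition above) =====
theorem find_substrings_with_pattern_spec : Claim_equal_find_substrings_with_pattern := by
  intro s pat _
  unfold Spec_find_substrings_with_pattern find_substrings_with_pattern find_substrings_with_pattern_alt
  simp only [PySem.Str.len_eq]
  have h := pvMain s pat (s.toList.length : Int) (pat.toList.length : Int) rfl rfl
      s.toList.length 0 [] (by simp)
  simpa using h
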